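-- pv_equiv track=rewrite | github.com/DarkEden052/Encryption-Decryption-Algorithm | Playfair_Cipher.py | FillerLetter
-- ===== SOURCE A (Python) =====
-- def FillerLetter(text):
--     new_word = ""
--     i = 0
--     while i < len(text):
--         new_word += text[i]
--         if i + 1 < len(text) and text[i] == text[i + 1]:
--             new_word += 'x'  # Insert 'x' if two identical letters are found
--         i += 1
--     return new_word
-- ===== SOURCE B (Python) =====
-- def FillerLetter(text):
--     # run-based: split into maximal runs of equal chars, join each run with 'x'
--     parts = []
--     i = 0
--     n = len(text)
--     while i < n:
--         j = i
--         while j < n and text[j] == text[i]: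
--             j += 1
--         parts.append('x'.join(text[i:j]))
--         i = j
--     return ''.join(parts)
-- ===== Notes on version B (the rewrite author's own statement) =====
-- stated objective: faster
-- what changed: B splits the string into maximal runs of equal characters and joins each run with the filler before one final join, instead of A's per-index walk that appends to a growing string with a look-ahead test.
import Mathlib
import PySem

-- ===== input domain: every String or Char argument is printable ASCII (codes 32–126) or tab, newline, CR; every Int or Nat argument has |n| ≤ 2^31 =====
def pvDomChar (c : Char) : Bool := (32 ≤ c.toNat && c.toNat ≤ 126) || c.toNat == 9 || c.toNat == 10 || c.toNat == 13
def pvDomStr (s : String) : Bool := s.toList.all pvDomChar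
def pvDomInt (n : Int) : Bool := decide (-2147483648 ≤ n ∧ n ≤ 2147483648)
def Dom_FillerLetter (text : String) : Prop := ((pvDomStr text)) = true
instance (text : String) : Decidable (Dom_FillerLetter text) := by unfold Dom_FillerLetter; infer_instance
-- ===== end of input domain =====

-- B rebuilds the output run-by-run ('x'-joined maximal runs of equal chars) instead of A's per-index look-ahead walk; alternative decomposition, same values.


-- ===== PORT A =====
-- A's while loop: emit text[i], then 'x' if the next char exists and equals it.
def pvAGo : List Char → List Char
  | [] => []
  | [c] => [c]
  | c :: d :: rest => if c == d then c :: 'x' :: pvAGo (d :: rest) else c :: pvAGo (d :: rest)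

def FillerLetter (text : String) : String := String.ofList (pvAGo text.toList)

-- ===== PORT B =====
-- B's outer loop: take the maximal run of the head char, 'x'-join it, recurse on the rest.
def pvBGo : List Char → List Char
  | [] => []
  | c :: rest =>
    List.intersperse 'x' (c :: rest.takeWhile (· == c)) ++ pvBGo (rest.dropWhile (· == c))
termination_by l => l.length
decreasing_by
  have := List.length_dropWhile_le (p := (· == c)) (l := rest)
  simpa using Nat.lt_succ_of_le this

def FillerLetter_alt (text : String) : String := String.ofList (pvBGo text.toList)

-- ===== PRECONDITION & SPEC =====
def Spec_FillerLetter (text : String) (out : String) : Prop := out = FillerLetter_alt text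
instance (text : String) (out : String) : Decidable (Spec_FillerLetter text out) := by unfold Spec_FillerLetter; infer_instance

-- ===== CLAIM (what is proved, stated in full; the proofs are below) =====
def Claim_equal_FillerLetter : Prop := ∀ (text : String), Dom_FillerLetter text → Spec_FillerLetter text (FillerLetter text)

-- ===== LEMMAS AND PROOFS =====
theorem pvAGo_run (rest : List Char) : ∀ (c : Char),
    pvAGo (c :: rest) =
      List.intersperse 'x' (c :: rest.takeWhile (· == c)) ++ pvAGo (rest.dropWhile (· == c)) := by
  induction rest with
  | nil => intro c; simp [pvAGo]
  | cons d rs ih =>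
    intro c
    by_cases h : c = d
    · subst h
      simp only [pvAGo, beq_self_eq_true, if_true, List.takeWhile, List.dropWhile]
      rw [ih c]
      cases hts : rs.takeWhile (· == c) <;> simp [List.intersperse]
    · have hb : (c == d) = false := by simp [h]
      have hb' : (d == c) = false := by simp [Ne.symm h]
      simp [pvAGo, hb, hb', List.takeWhile, List.dropWhile]

theorem pvAGo_eq_pvBGo : ∀ (n : ℕ) (l : List Char), l.length ≤ n → pvAGo l = pvBGo l := by
  intro n
  induction n with
  | zero =>
    intro l h
    have : l = [] := List.length_eq_zero_iff.mp (Nat.le_zero.mp h)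
    subst this; rw [pvBGo.eq_def]; rfl
  | succ m ih =>
    intro l h
    cases l with
    | nil => rw [pvBGo.eq_def]; rfl
    | cons c rest =>
      rw [pvAGo_run, pvBGo.eq_def]
      congr 1
      exact ih _ (le_trans (List.length_dropWhile_le _ _) (Nat.le_of_succ_le_succ h))

-- ===== VERDICT (by name: the statement is the Claim_ definition above) =====
theorem FillerLetter_spec : Claim_equal_FillerLetter := by
  intro text _
  unfold Spec_FillerLetter FillerLetter FillerLetter_alt
  rw [pvAGo_eq_pvBGo text.toList.length _ le_rfl]
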